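-- pv_equiv track=rewrite | github.com/fa7271/Python-Algorithm | bs/Programmers/Level3/숫자 게임.py | solution
-- ===== SOURCE A (Python) =====
-- from collections import deque
--
-- def solution(A, B):
--     idx = 0
--     A = deque(sorted(A))
--     B = deque(sorted(B))
--     count = 0
--     while len(B) > 0 and len(A) > 0:
--         left, right = A.popleft(), B.popleft()
--         if right > left :
--             count += 1
--         else:
--             idx += 1
--             A.appendleft(left)
--     return count
-- ===== SOURCE B (Python) =====
-- from collections import deque
--
-- def solution(A, B):
--     # Two pointers from the HIGH ends: walk A's values largest-first; a B value
--     # is consumed only when it beats the current (largest remaining) A value.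
--     rest = deque(sorted(B)[::-1])
--     count = 0
--     for a in sorted(A)[::-1]:
--         if rest and rest[0] > a:
--             count += 1
--             rest.popleft()
--     return count
-- ===== Notes on version B (the rewrite author's own statement) =====
-- stated objective: alternative
-- what changed: Replaces the deque simulation that pops both low ends and re-appends unbeaten A elements with a single fold over the descending-sorted lists that discards the largest remaining A element each step and consumes a B element only when it wins.
import Mathlib
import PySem

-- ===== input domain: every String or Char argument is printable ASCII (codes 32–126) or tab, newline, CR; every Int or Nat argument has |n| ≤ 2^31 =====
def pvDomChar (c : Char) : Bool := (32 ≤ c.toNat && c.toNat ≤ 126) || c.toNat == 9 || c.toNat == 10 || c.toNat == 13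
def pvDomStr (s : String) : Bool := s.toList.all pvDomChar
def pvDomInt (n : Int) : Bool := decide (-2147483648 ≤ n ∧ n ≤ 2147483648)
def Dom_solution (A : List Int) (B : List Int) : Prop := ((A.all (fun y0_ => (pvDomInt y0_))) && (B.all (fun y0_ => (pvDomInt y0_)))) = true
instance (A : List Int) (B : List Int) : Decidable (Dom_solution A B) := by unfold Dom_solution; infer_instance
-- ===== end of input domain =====

-- B replaces A's deque simulation (pop both low ends, re-append unbeaten A elements) with one
-- fold over the descending-sorted lists, dropping the largest remaining A element each step;
-- objective: alternative decomposition of the same greedy matching, same O(n log n) cost.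


-- ===== PORT A =====
-- while len(B) > 0 and len(A) > 0: pop both fronts; on a win count, else re-append A's front
def solLoop (A : List Int) (B : List Int) (idx : Int) (count : Int) : Int :=
  match A, B with
  | a :: as_, b :: bs => if b > a then solLoop as_ bs idx (count + 1)
                         else solLoop (a :: as_) bs (idx + 1) count
  | _, _ => count
termination_by B.length

def solution (A : List Int) (B : List Int) : Int :=
  solLoop (PySem.List.sorted A (fun x => x) false) (PySem.List.sorted B (fun x => x) false) 0 0

-- ===== PORT B =====
-- loop body: if rest and rest[0] > a: count += 1; rest = rest[1:]
def hiStep (s : List Int × Int) (a : Int) : List Int × Int :=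
  match s.1 with
  | [] => s
  | b :: bs => if b > a then (bs, s.2 + 1) else (s.1, s.2)

def solution_alt (A : List Int) (B : List Int) : Int :=
  let ra := (PySem.List.sorted A (fun x => x) false).reverse
  let rest := (PySem.List.sorted B (fun x => x) false).reverse
  (ra.foldl hiStep (rest, 0)).2

-- ===== PRECONDITION & SPEC =====
def Spec_solution (A : List Int) (B : List Int) (out : Int) : Prop := out = solution_alt A B
instance (A : List Int) (B : List Int) (out : Int) : Decidable (Spec_solution A B out) := by unfold Spec_solution; infer_instance

-- ===== CLAIM (what is proved, stated in full; the proofs are below) =====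
def Claim_equal_solution : Prop := ∀ (A : List Int) (B : List Int), Dom_solution A B → Spec_solution A B (solution A B)

-- ===== LEMMAS AND PROOFS =====

-- the low-end greedy count (A's loop without its accumulators)
def lowG (A : List Int) (B : List Int) : Int :=
  match A, B with
  | a :: as_, b :: bs => if b > a then 1 + lowG as_ bs else lowG (a :: as_) bs
  | _, _ => 0
termination_by B.length

lemma lowG_nil_left (bs : List Int) : lowG [] bs = 0 := by
  cases bs <;> simp [lowG]

lemma lowG_nil_right (as_ : List Int) : lowG as_ [] = 0 := by
  cases as_ <;> simp [lowG]

lemma solLoop_eq (B : List Int) : ∀ (A : List Int) (idx count : Int),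
    solLoop A B idx count = count + lowG A B := by
  induction B with
  | nil => intro A idx count; cases A <;> simp [solLoop, lowG]
  | cons b bs ih =>
    intro A idx count
    cases A with
    | nil => simp [solLoop, lowG_nil_left]
    | cons a as_ =>
      by_cases h : b > a
      · simp [solLoop, lowG, h, ih]; ring
      · simp [solLoop, lowG, h, ih]

-- appending a to A that dominates every element of B leaves the greedy count unchanged
lemma lowG_append_max (bs : List Int) : ∀ (xs : List Int) (a : Int),
    (∀ y ∈ bs, y ≤ a) → lowG (xs ++ [a]) bs = lowG xs bs := by
  induction bs with
  | nil => intro xs a _; simp [lowG_nil_right]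
  | cons b bs' ih =>
    intro xs a hle
    have hba : ¬ b > a := by have := hle b (by simp); omega
    cases xs with
    | nil =>
      have h0 : lowG ([] ++ [a]) bs' = lowG [] bs' := ih [] a (fun y hy => hle y (by simp [hy]))
      simp only [List.nil_append] at h0
      simp [lowG, hba, h0, lowG_nil_left]
    | cons x xs' =>
      by_cases h : b > x
      · simp [lowG, h, ih (xs') a (fun y hy => hle y (by simp [hy]))]
      · have h1 := ih (x :: xs') a (fun y hy => hle y (by simp [hy]))
        simp only [List.cons_append] at h1
        simp [lowG, h, h1]

-- appending a maximal a to A and some b > a to B adds exactly one greedy win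
lemma lowG_append_win (ys : List Int) : ∀ (xs : List Int) (a b : Int),
    (∀ x ∈ xs, x ≤ a) → b > a → lowG (xs ++ [a]) (ys ++ [b]) = 1 + lowG xs ys := by
  induction ys with
  | nil =>
    intro xs a b hxs hba
    cases xs with
    | nil => simp [lowG, hba, lowG_nil_right]
    | cons x xs' =>
      have hbx : b > x := by have := hxs x (by simp); omega
      simp [lowG, hbx, lowG_nil_right]
  | cons y ys' ih =>
    intro xs a b hxs hba
    cases xs with
    | nil =>
      simp only [List.nil_append, List.cons_append]
      by_cases h : y > a
      · simp [lowG, h, lowG_nil_left]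
      · have := ih [] a b (by simp) hba
        simp only [List.nil_append] at this
        simp [lowG, h, this, lowG_nil_left]
    | cons x xs' =>
      by_cases h : y > x
      · simp [lowG, h, ih xs' a b (fun z hz => hxs z (by simp [hz])) hba]
      · have h1 := ih (x :: xs') a b hxs hba
        simp only [List.cons_append] at h1
        simp [lowG, h, h1]

-- the high-end fold computes the low-end greedy count on the un-reversed lists
lemma foldl_hiStep_eq (da : List Int) : ∀ (db : List Int) (c : Int),
    da.Pairwise (fun x y => y ≤ x) → db.Pairwise (fun x y => y ≤ x) →
    (da.foldl hiStep (db, c)).2 = c + lowG da.reverse db.reverse := by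
  induction da with
  | nil => intro db c _ _; simp [lowG_nil_left]
  | cons a da' ih =>
    intro db c hda hdb
    have hda' : da'.Pairwise (fun x y => y ≤ x) := (List.pairwise_cons.mp hda).2
    have hale : ∀ x ∈ da', x ≤ a := (List.pairwise_cons.mp hda).1
    cases db with
    | nil =>
      have hrest : ∀ (l : List Int) (c : Int), (l.foldl hiStep (([] : List Int), c)) = ([], c) := by
        intro l; induction l with
        | nil => intro c; rfl
        | cons z l' ihl => intro c; simpa [hiStep] using ihl c
      simp [hrest, lowG_nil_right]
    | cons b db' =>
      have hdb' : db'.Pairwise (fun x y => y ≤ x) := (List.pairwise_cons.mp hdb).2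
      have hble : ∀ y ∈ db', y ≤ b := (List.pairwise_cons.mp hdb).1
      by_cases h : b > a
      · have hwin := lowG_append_win db'.reverse da'.reverse a b
          (fun x hx => hale x (List.mem_reverse.mp hx)) h
        simp [List.foldl_cons, hiStep, h, ih db' (c + 1) hda' hdb', List.reverse_cons, hwin]
        ring
      · have hmax := lowG_append_max (b :: db').reverse da'.reverse a
          (by intro y hy
              rcases List.mem_reverse.mp hy with hy'
              rcases List.mem_cons.mp hy' with rfl | hy''
              · omega
              · have := hble y hy''; omega)
        simp only [List.reverse_cons] at hmax
        simp [List.foldl_cons, hiStep, h, ih (b :: db') c hda' hdb, List.reverse_cons]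
        exact hmax.symm

-- ===== VERDICT (by name: the statement is the Claim_ definition above) =====
theorem solution_spec : Claim_equal_solution := by
  intro A B _
  unfold Spec_solution solution solution_alt
  set sa := PySem.List.sorted A (fun x => x) false with hsa
  set sb := PySem.List.sorted B (fun x => x) false with hsb
  have hpa : sa.Pairwise (· ≤ ·) := by
    simpa using PySem.List.sorted_pairwise (xs := A) (key := fun x => x)
  have hpb : sb.Pairwise (· ≤ ·) := by
    simpa using PySem.List.sorted_pairwise (xs := B) (key := fun x => x)
  have := foldl_hiStep_eq sa.reverse sb.reverse 0
    (by simpa [List.pairwise_reverse] using hpa)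
    (by simpa [List.pairwise_reverse] using hpb)
  simp only [List.reverse_reverse] at this
  rw [solLoop_eq sb sa 0 0, this]
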